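-- pv_equiv track=rewrite | github.com/suyoumo/OpenClawProBench | custom_checks/intel_m07_planning_dependency_chain.py | _validate_parallel_groups
-- ===== SOURCE A (Python) =====
-- TASKS = {
--     "t1": {"depends_on": [], "duration": 30},
--     "t2": {"depends_on": ["t1"], "duration": 20},
--     "t3": {"depends_on": ["t1"], "duration": 25},
--     "t4": {"depends_on": ["t2", "t3"], "duration": 15},
--     "t5": {"depends_on": ["t4"], "duration": 40},
--     "t6": {"depends_on": ["t2"], "duration": 10},
-- }
--
-- def _validate_parallel_groups(groups: list) -> bool:
--     """Check parallel groups are valid: no intra-group dependencies, all deps in prior groups."""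
--     if not isinstance(groups, list):
--         return False
--     seen: set[str] = set()
--     all_ids: set[str] = set()
--     for group in groups:
--         if not isinstance(group, list):
--             return False
--         for tid in group:
--             if tid not in TASKS:
--                 return False
--             all_ids.add(tid)
--             deps = TASKS[tid]["depends_on"]
--             # All deps must be in previously seen groups
--             if not all(d in seen for d in deps):
--                 return False
--             # No intra-group dependency
--             if any(d in group for d in deps):
--                 return False
--         seen.update(group)
--     return all_ids == set(TASKS.keys())
-- ===== SOURCE B (Python) =====
-- TASKS = {
--     "t1": {"depends_on": [], "duration": 30},
--     "t2": {"depends_on": ["t1"], "duration": 20},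
--     "t3": {"depends_on": ["t1"], "duration": 25},
--     "t4": {"depends_on": ["t2", "t3"], "duration": 15},
--     "t5": {"depends_on": ["t4"], "duration": 40},
--     "t6": {"depends_on": ["t2"], "duration": 10},
-- }
--
-- def _validate_parallel_groups(groups: list) -> bool:
--     """Two-pass check: build a first-occurrence index table, then verify deps."""
--     if not isinstance(groups, list):
--         return False
--     # Pass 1: map each task id to the earliest group index where it occurs.
--     first_index: dict = {}
--     for g, group in enumerate(groups):
--         if not isinstance(group, list):
--             return False
--         for tid in group:
--             if tid not in TASKS:
--                 return False
--             if tid not in first_index: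
--                 first_index[tid] = g
--     # Pass 2: every dependency must first occur strictly earlier, and not
--     # recur in the current group.
--     for g, group in enumerate(groups):
--         for tid in group:
--             for dep in TASKS[tid]["depends_on"]:
--                 fi = first_index.get(dep)
--                 if fi is None or fi >= g or dep in group:
--                     return False
--     return set(first_index) == set(TASKS)
-- ===== Notes on version B (the rewrite author's own statement) =====
-- stated objective: alternative
-- what changed: Replaces A's single pass carrying a running `seen` set and `all_ids` accumulator by a two-pass decomposition: pass 1 builds a first-occurrence index table (tid -> earliest group index) while validating task ids, pass 2 checks every dependency's first index is strictly earlier and not in the current group, then compares the table's key set with TASKS.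
import Mathlib
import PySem

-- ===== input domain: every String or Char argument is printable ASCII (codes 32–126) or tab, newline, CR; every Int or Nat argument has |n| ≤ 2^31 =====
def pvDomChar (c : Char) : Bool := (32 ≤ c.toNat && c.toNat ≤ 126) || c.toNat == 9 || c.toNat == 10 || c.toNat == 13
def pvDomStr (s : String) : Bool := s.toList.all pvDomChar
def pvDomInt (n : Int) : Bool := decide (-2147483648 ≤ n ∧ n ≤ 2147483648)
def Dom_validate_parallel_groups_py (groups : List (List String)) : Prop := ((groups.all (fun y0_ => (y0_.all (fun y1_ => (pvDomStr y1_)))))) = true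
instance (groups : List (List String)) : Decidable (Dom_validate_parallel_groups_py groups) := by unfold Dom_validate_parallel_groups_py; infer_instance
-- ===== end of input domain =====

-- B replaces A's single pass over a running `seen` set by a two-pass decomposition:
-- build a first-occurrence index table first, then check every dependency against it
-- (objective: alternative decomposition, same asymptotic cost).

-- module-level constant TASKS, shared context of both programs
def TASKS_py : PySem.Dict String (List String × Int) :=
  PySem.Dict.ofList [("t1", ([], 30)), ("t2", (["t1"], 20)), ("t3", (["t1"], 25)),
    ("t4", (["t2", "t3"], 15)), ("t5", (["t4"], 40)), ("t6", (["t2"], 10))]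

-- ===== PORT A =====
-- inner `for tid in group` loop: returns the updated all_ids, or none on `return False`
def aGroup : List String → List String → PySem.Set String → PySem.Set String →
    Option (PySem.Set String)
  | [], _group, _seen, allIds => some allIds
  | tid :: rest, group, seen, allIds =>
    match TASKS_py.get? tid with
    | none => none
    | some entry =>
      if entry.1.all (fun d => PySem.Set.contains seen d) then
        if entry.1.any (fun d => group.contains d) then none
        else aGroup rest group seen (PySem.Set.add allIds tid)
      else none

-- outer `for group in groups` loop carrying `seen` and `all_ids`
def aGo : List (List String) → PySem.Set String → PySem.Set String → Bool
  | [], _seen, allIds => PySem.Set.equal allIds (PySem.Set.ofList TASKS_py.keys)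
  | group :: rest, seen, allIds =>
    match aGroup group group seen allIds with
    | none => false
    | some allIds' => aGo rest (PySem.Set.update seen group) allIds'

def validate_parallel_groups_py (groups : List (List String)) : Bool :=
  aGo groups PySem.Set.empty PySem.Set.empty

-- ===== PORT B =====
-- pass 1 inner loop: record the first group index of each tid; none on unknown tid
def bIndexGroup : List String → Int → PySem.Dict String Int → Option (PySem.Dict String Int)
  | [], _g, fi => some fi
  | tid :: rest, g, fi =>
    if TASKS_py.contains tid then
      bIndexGroup rest g (if fi.contains tid then fi else fi.insert tid g)
    else none

-- pass 1 outer loop over enumerate(groups)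
def bIndex : List (List String) → Int → PySem.Dict String Int → Option (PySem.Dict String Int)
  | [], _g, fi => some fi
  | group :: rest, g, fi =>
    match bIndexGroup group g fi with
    | none => none
    | some fi' => bIndex rest (g + 1) fi'

-- pass 2 test of one dependency: `not (fi is None or fi >= g or dep in group)`
def bDepOk (fi : PySem.Dict String Int) (g : Int) (group : List String) (dep : String) : Bool :=
  match fi.get? dep with
  | none => false
  | some k => decide (k < g) && !(group.contains dep)

-- pass 2 over enumerate(groups)
def bCheck (fi : PySem.Dict String Int) : List (List String) → Int → Bool
  | [], _g => true
  | group :: rest, g =>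
    group.all (fun tid => ((TASKS_py.getD tid ([], 0)).1).all (bDepOk fi g group)) &&
      bCheck fi rest (g + 1)

def validate_parallel_groups_py_alt (groups : List (List String)) : Bool :=
  match bIndex groups 0 PySem.Dict.empty with
  | none => false
  | some fi =>
    bCheck fi groups 0 &&
      PySem.Set.equal (PySem.Set.ofList fi.keys) (PySem.Set.ofList TASKS_py.keys)

-- ===== PRECONDITION & SPEC =====
def Spec_validate_parallel_groups_py (groups : List (List String)) (out : Bool) : Prop :=
  out = validate_parallel_groups_py_alt groups
instance (groups : List (List String)) (out : Bool) :
    Decidable (Spec_validate_parallel_groups_py groups out) := by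
  unfold Spec_validate_parallel_groups_py; infer_instance

-- ===== CLAIM (what is proved, stated in full; the proofs are below) =====
def Claim_equal_validate_parallel_groups_py : Prop :=
  ∀ (groups : List (List String)), Dom_validate_parallel_groups_py groups →
    Spec_validate_parallel_groups_py groups (validate_parallel_groups_py groups)

-- ===== LEMMAS AND PROOFS =====

-- the per-tid check of A, phrased on an abstract `seen` set
def okT (seen : PySem.Set String) (group : List String) (tid : String) : Bool :=
  match TASKS_py.get? tid with
  | none => false
  | some entry => entry.1.all (fun d => PySem.Set.contains seen d && !(group.contains d))

-- the common reference form: per-group checks against the flattened prefix `pre`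
def okT2 (pre group : List String) (tid : String) : Bool :=
  match TASKS_py.get? tid with
  | none => false
  | some entry => entry.1.all (fun d => pre.contains d && !(group.contains d))

def checks2 : List (List String) → List String → Bool
  | [], _pre => true
  | group :: rest, pre => group.all (okT2 pre group) && checks2 rest (pre ++ group)

-- pass-1 result as a pure fold (inner / outer)
def pass1G (g : Int) : List String → PySem.Dict String Int → PySem.Dict String Int
  | [], fi => fi
  | tid :: rest, fi => pass1G g rest (if fi.contains tid then fi else fi.insert tid g)

def pass1 : List (List String) → Int → PySem.Dict String Int → PySem.Dict String Int
  | [], _g, fi => fi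
  | group :: rest, g, fi => pass1 rest (g + 1) (pass1G g group fi)

lemma all_and_not_any (l : List String) (p q : String → Bool) :
    (l.all p && !(l.any q)) = l.all (fun d => p d && !q d) := by
  induction l with
  | nil => rfl
  | cons x xs ih =>
    simp only [List.all_cons, List.any_cons, Bool.not_or]
    rw [← ih]
    cases p x <;> cases q x <;> cases xs.all p <;> cases xs.any q <;> rfl

lemma aGroup_spec (rest group : List String) (seen : PySem.Set String) :
    ∀ allIds : PySem.Set String,
      aGroup rest group seen allIds =
        if rest.all (okT seen group) then some (PySem.Set.update allIds rest) else none := by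
  induction rest with
  | nil => intro allIds; rfl
  | cons tid t ih =>
    intro allIds
    simp only [aGroup, List.all_cons]
    cases h : TASKS_py.get? tid with
    | none => simp [okT, h]
    | some entry =>
      have hok : okT seen group tid =
          (entry.1.all (fun d => PySem.Set.contains seen d) &&
            !(entry.1.any (fun d => group.contains d))) := by
        simp [okT, h, all_and_not_any]
      dsimp only
      cases ha : entry.1.all (fun d => PySem.Set.contains seen d) with
      | false =>
        have hOkF : okT seen group tid = false := by rw [hok, ha, Bool.false_and]
        simp [hOkF]
      | true =>
        cases hb : entry.1.any (fun d => group.contains d) with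
        | true =>
          have hOkF : okT seen group tid = false := by rw [hok, ha, hb]; rfl
          simp [hOkF]
        | false =>
          have hOk : okT seen group tid = true := by rw [hok, ha, hb]; rfl
          simp only [if_neg (by simp : ¬(false = true)), hOk, Bool.true_and]
          rw [ih]
          rfl

lemma contains_add (s : PySem.Set String) (x d : String) :
    PySem.Set.contains (PySem.Set.add s x) d = (PySem.Set.contains s d || d == x) := by
  rw [Bool.eq_iff_iff]
  simp only [Bool.or_eq_true, beq_iff_eq, PySem.Set.contains, List.contains_iff_mem]
  exact PySem.Set.mem_add s x d

lemma contains_update (s : PySem.Set String) (l : List String) (d : String) :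
    PySem.Set.contains (PySem.Set.update s l) d = (PySem.Set.contains s d || l.contains d) := by
  induction l generalizing s with
  | nil => simp [PySem.Set.update]
  | cons x xs ih =>
    show PySem.Set.contains (PySem.Set.update (PySem.Set.add s x) xs) d = _
    rw [ih, contains_add, Bool.eq_iff_iff]
    simp only [Bool.or_eq_true, beq_iff_eq, PySem.Set.contains, List.contains_iff_mem,
      List.mem_cons]
    tauto

lemma update_update (s : PySem.Set String) (l₁ l₂ : List String) :
    PySem.Set.update (PySem.Set.update s l₁) l₂ = PySem.Set.update s (l₁ ++ l₂) := by
  simp [PySem.Set.update, List.foldl_append]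

lemma aGo_spec (gs : List (List String)) :
    ∀ (seen allIds : PySem.Set String) (pre : List String),
      (∀ d, PySem.Set.contains seen d = pre.contains d) →
      aGo gs seen allIds =
        (checks2 gs pre &&
          PySem.Set.equal (PySem.Set.update allIds gs.flatten)
            (PySem.Set.ofList TASKS_py.keys)) := by
  induction gs with
  | nil => intro seen allIds pre _; simp [aGo, checks2, PySem.Set.update]
  | cons group rest ih =>
    intro seen allIds pre h
    have hok : group.all (okT seen group) = group.all (okT2 pre group) := by
      apply List.all_congr rfl
      intro tid
      simp only [okT, okT2]
      cases TASKS_py.get? tid with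
      | none => rfl
      | some entry =>
        dsimp only
        apply List.all_congr rfl
        intro d
        rw [h d]
    simp only [aGo, aGroup_spec, checks2, List.flatten_cons]
    cases hall : group.all (okT seen group) with
    | false =>
      rw [if_neg (by simp)]
      have h2 : group.all (okT2 pre group) = false := by rw [← hok]; exact hall
      simp [h2]
    | true =>
      rw [if_pos rfl]
      dsimp only
      have h2 : group.all (okT2 pre group) = true := by rw [← hok]; exact hall
      rw [h2, Bool.true_and,
        ih (PySem.Set.update seen group) (PySem.Set.update allIds group) (pre ++ group)
          (fun d => by rw [contains_update, h d, List.contains_append]),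
        update_update]

lemma bIndexGroup_spec (l : List String) (g : Int) :
    ∀ fi : PySem.Dict String Int,
      bIndexGroup l g fi =
        if l.all (fun t => TASKS_py.contains t) then some (pass1G g l fi) else none := by
  induction l with
  | nil => intro fi; rfl
  | cons tid rest ih =>
    intro fi
    simp only [bIndexGroup, List.all_cons, pass1G]
    cases h : TASKS_py.contains tid with
    | false => simp
    | true => simp [ih]

lemma bIndex_spec (gs : List (List String)) :
    ∀ (g : Int) (fi : PySem.Dict String Int),
      bIndex gs g fi =
        if gs.flatten.all (fun t => TASKS_py.contains t) then some (pass1 gs g fi) else none := by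
  induction gs with
  | nil => intro g fi; rfl
  | cons group rest ih =>
    intro g fi
    simp only [bIndex, List.flatten_cons, List.all_append, bIndexGroup_spec, pass1]
    cases h : group.all (fun t => TASKS_py.contains t) with
    | false => simp
    | true => simp [ih]

lemma get?_pass1G (g : Int) (l : List String) (d : String) :
    ∀ fi : PySem.Dict String Int,
      (pass1G g l fi).get? d =
        (match fi.get? d with
         | some k => some k
         | none => if l.contains d then some g else none) := by
  induction l with
  | nil =>
    intro fi
    show fi.get? d = _
    cases fi.get? d <;> rfl
  | cons tid rest ih =>
    intro fi
    simp only [pass1G, ih, List.contains_cons]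
    by_cases hd : d = tid
    · subst hd
      cases hc : fi.contains d with
      | true =>
        rw [if_pos rfl]
        have hs : (fi.get? d).isSome = true := by
          rw [← PySem.Dict.contains_eq_isSome_get?]; exact hc
        obtain ⟨k, hk⟩ := Option.isSome_iff_exists.mp hs
        simp [hk]
      | false =>
        have hnone : fi.get? d = none := by
          cases h' : fi.get? d with
          | none => rfl
          | some k =>
            exfalso
            have hs : (fi.get? d).isSome = true := by simp [h']
            rw [← PySem.Dict.contains_eq_isSome_get?] at hs
            simp [hc] at hs
        rw [if_neg (by simp), PySem.Dict.get?_insert, if_pos rfl, hnone]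
        simp
    · have hbe : (d == tid) = false := by simpa using hd
      cases hc : fi.contains tid with
      | true =>
        rw [if_pos rfl]
        simp [hbe]
      | false =>
        rw [if_neg (by simp), PySem.Dict.get?_insert, if_neg hd]
        simp [hbe]

lemma get?_pass1 (gs : List (List String)) (d : String) :
    ∀ (g : Int) (fi : PySem.Dict String Int),
      (pass1 gs g fi).get? d =
        (match fi.get? d with
         | some k => some k
         | none =>
           (List.findIdx? (fun grp => grp.contains d) gs).map (fun n : Nat => g + (n : Int))) := by
  induction gs with
  | nil =>
    intro g fi
    show fi.get? d = _
    cases fi.get? d <;> rfl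
  | cons group rest ih =>
    intro g fi
    cases h : fi.get? d with
    | some k => simp only [pass1, ih, get?_pass1G, h]
    | none =>
      simp only [pass1, ih, get?_pass1G, h, List.findIdx?_cons]
      cases hg : group.contains d with
      | true => simp
      | false =>
        rw [if_neg (by simp), if_neg (by simp)]
        cases hfind : List.findIdx? (fun grp => grp.contains d) rest with
        | none => simp
        | some n =>
          simp
          ring

lemma all_mul_all (l : List String) (p q : String → Bool) :
    (l.all p && l.all q) = l.all (fun t => p t && q t) := by
  induction l with
  | nil => rfl
  | cons x xs ih =>
    simp only [List.all_cons, ← ih]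
    cases p x <;> cases q x <;> cases xs.all p <;> cases xs.all q <;> rfl

lemma bridgeB (gs : List (List String)) :
    ∀ (g0 : Nat) (pre : List String) (fi : PySem.Dict String Int),
      (∀ d, ((fi.get? d).any (fun k => decide (k < (g0 : Int)))) = pre.contains d) →
      (∀ d, pre.contains d = false →
        fi.get? d = (List.findIdx? (fun grp => grp.contains d) gs).map
          (fun n : Nat => (g0 : Int) + (n : Int))) →
      (gs.flatten.all (fun t => TASKS_py.contains t) && bCheck fi gs (g0 : Int)) =
        checks2 gs pre := by
  induction gs with
  | nil => intro g0 pre fi _ _; rfl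
  | cons group rest ih =>
    intro g0 pre fi h1 h2
    have hper : ∀ tid,
        (TASKS_py.contains tid &&
          ((TASKS_py.getD tid ([], 0)).1).all (bDepOk fi (g0 : Int) group)) =
        okT2 pre group tid := by
      intro tid
      cases h : TASKS_py.get? tid with
      | none =>
        have hc : TASKS_py.contains tid = false := by
          rw [PySem.Dict.contains_eq_isSome_get?, h]; rfl
        simp [hc, okT2, h]
      | some entry =>
        have hc : TASKS_py.contains tid = true := by
          rw [PySem.Dict.contains_eq_isSome_get?, h]; rfl
        rw [hc, PySem.Dict.getD_of_get?_eq_some TASKS_py ([], 0) h]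
        simp only [okT2, h, Bool.true_and]
        apply List.all_congr rfl
        intro dep
        have hb : bDepOk fi (g0 : Int) group dep =
            (((fi.get? dep).any (fun k => decide (k < (g0 : Int)))) &&
              !(group.contains dep)) := by
          simp only [bDepOk]
          cases fi.get? dep with
          | none => rfl
          | some k => rfl
        rw [hb, h1 dep]
    have h1' : ∀ d, ((fi.get? d).any (fun k => decide (k < ((g0 + 1 : Nat) : Int)))) =
        (pre ++ group).contains d := by
      intro d
      rw [List.contains_append]
      cases hp : pre.contains d with
      | true =>
        have hthis := h1 d
        rw [hp] at hthis
        cases hfi : fi.get? d with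
        | none => rw [hfi] at hthis; simp at hthis
        | some k =>
          rw [hfi] at hthis
          simp only [Option.any_some, decide_eq_true_eq] at hthis
          simp only [Option.any_some, Bool.true_or]
          rw [decide_eq_true_eq]
          push_cast
          omega
      | false =>
        rw [h2 d hp, List.findIdx?_cons]
        cases hg : group.contains d with
        | true =>
          rw [if_pos rfl]
          simp only [Option.map_some, Option.any_some, Bool.false_or]
          rw [decide_eq_true_eq]
          push_cast
          omega
        | false =>
          rw [if_neg (by simp)]
          simp only [Bool.or_false]
          cases hfind : List.findIdx? (fun grp => grp.contains d) rest with
          | none => rfl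
          | some n =>
            simp only [Option.map_some, Option.any_some]
            rw [decide_eq_false_iff_not]
            push_cast
            omega
    have h2' : ∀ d, (pre ++ group).contains d = false →
        fi.get? d = (List.findIdx? (fun grp => grp.contains d) rest).map
          (fun n : Nat => ((g0 + 1 : Nat) : Int) + (n : Int)) := by
      intro d hd
      rw [List.contains_append] at hd
      have hp : pre.contains d = false := by cases h : pre.contains d <;> simp_all
      have hg : group.contains d = false := by cases h : group.contains d <;> simp_all
      rw [h2 d hp, List.findIdx?_cons, if_neg (by rw [hg]; simp)]
      cases hfind : List.findIdx? (fun grp => grp.contains d) rest with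
      | none => rfl
      | some n =>
        simp only [Option.map_some]
        congr 1
        push_cast
        ring
    have ihres := ih (g0 + 1) (pre ++ group) fi h1' h2'
    have hgrp : group.all (okT2 pre group) =
        (group.all (fun t => TASKS_py.contains t) &&
          group.all (fun tid => ((TASKS_py.getD tid ([], 0)).1).all
            (bDepOk fi (g0 : Int) group))) := by
      rw [all_mul_all]
      exact (List.all_congr rfl (fun tid => hper tid)).symm
    simp only [checks2, List.flatten_cons, List.all_append, bCheck]
    rw [hgrp, show ((g0 : Int) + 1) = ((g0 + 1 : Nat) : Int) by push_cast; ring, ← ihres]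
    cases group.all (fun t => TASKS_py.contains t) <;>
      cases rest.flatten.all (fun t => TASKS_py.contains t) <;>
      cases group.all (fun tid => ((TASKS_py.getD tid ([], 0)).1).all
        (bDepOk fi (g0 : Int) group)) <;>
      cases bCheck fi rest ((g0 + 1 : Nat) : Int) <;> rfl

lemma checks2_all_contains (gs : List (List String)) :
    ∀ pre, checks2 gs pre = true →
      gs.flatten.all (fun t => TASKS_py.contains t) = true := by
  induction gs with
  | nil => intro pre _; rfl
  | cons group rest ih =>
    intro pre h
    simp only [checks2, Bool.and_eq_true] at h
    simp only [List.flatten_cons, List.all_append, Bool.and_eq_true]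
    refine ⟨?_, ih _ h.2⟩
    rw [List.all_eq_true] at h ⊢
    intro t ht
    have := h.1 t ht
    simp only [okT2] at this
    cases hg : TASKS_py.get? t with
    | none => rw [hg] at this; simp at this
    | some e => rw [PySem.Dict.contains_eq_isSome_get?, hg]; rfl

lemma all_congr_of_mem_iff {s₁ s₂ : List String} (h : ∀ x, x ∈ s₁ ↔ x ∈ s₂)
    (p : String → Bool) : s₁.all p = s₂.all p := by
  rw [Bool.eq_iff_iff]
  simp only [List.all_eq_true]
  constructor
  · intro hh x hx; exact hh x ((h x).mpr hx)
  · intro hh x hx; exact hh x ((h x).mp hx)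

lemma equal_congr_left (s₁ s₂ t : PySem.Set String) (h : ∀ x, x ∈ s₁ ↔ x ∈ s₂) :
    PySem.Set.equal s₁ t = PySem.Set.equal s₂ t := by
  simp only [PySem.Set.equal, PySem.Set.issubset]
  rw [all_congr_of_mem_iff h]
  congr 1
  apply List.all_congr rfl
  intro x
  simp only [PySem.Set.contains]
  rw [Bool.eq_iff_iff]
  simp only [List.contains_iff_mem]
  exact h x

lemma A_char (groups : List (List String)) :
    validate_parallel_groups_py groups =
      (checks2 groups [] &&
        PySem.Set.equal (PySem.Set.ofList groups.flatten)
          (PySem.Set.ofList TASKS_py.keys)) := by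
  unfold validate_parallel_groups_py
  rw [aGo_spec groups PySem.Set.empty PySem.Set.empty [] (fun d => rfl)]
  rfl

-- ===== VERDICT (by name: the statement is the Claim_ definition above) =====
theorem validate_parallel_groups_py_spec : Claim_equal_validate_parallel_groups_py := by
  unfold Claim_equal_validate_parallel_groups_py
  intro groups _
  unfold Spec_validate_parallel_groups_py validate_parallel_groups_py_alt
  rw [bIndex_spec, A_char]
  cases hall : groups.flatten.all (fun t => TASKS_py.contains t) with
  | false =>
    rw [if_neg (by simp)]
    have hc2 : checks2 groups [] = false := by
      cases hc : checks2 groups [] with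
      | false => rfl
      | true => exact absurd (checks2_all_contains groups [] hc) (by simp [hall])
    simp [hc2]
  | true =>
    rw [if_pos rfl]
    dsimp only
    have hget : ∀ d, (pass1 groups 0 PySem.Dict.empty).get? d =
        (List.findIdx? (fun grp => grp.contains d) groups).map
          (fun n : Nat => ((0 : Nat) : Int) + (n : Int)) := by
      intro d
      rw [get?_pass1]
      simp [PySem.Dict.get?_empty]
    have h1 : ∀ d, (((pass1 groups 0 PySem.Dict.empty).get? d).any
        (fun k => decide (k < ((0 : Nat) : Int)))) = ([] : List String).contains d := by
      intro d
      rw [hget d]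
      cases List.findIdx? (fun grp => grp.contains d) groups with
      | none => rfl
      | some n =>
        show (decide (((0 : Nat) : Int) + (n : Int) < ((0 : Nat) : Int))) = false
        simp
    have hbridge := bridgeB groups 0 [] (pass1 groups 0 PySem.Dict.empty) h1
      (fun d _ => hget d)
    rw [hall, Bool.true_and, show ((0 : Nat) : Int) = (0 : Int) by norm_num] at hbridge
    rw [hbridge]
    congr 1
    apply equal_congr_left
    intro x
    rw [PySem.Set.mem_ofList, PySem.Set.mem_ofList]
    have hiff : x ∈ (pass1 groups 0 PySem.Dict.empty).keys ↔
        ((pass1 groups 0 PySem.Dict.empty).get? x).isSome = true := by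
      constructor
      · intro hx
        cases h' : (pass1 groups 0 PySem.Dict.empty).get? x with
        | none =>
          exact absurd hx ((PySem.Dict.get?_eq_none_iff_not_mem_keys _ x).mp h')
        | some k => rfl
      · intro hx
        by_contra hmem
        rw [(PySem.Dict.get?_eq_none_iff_not_mem_keys _ x).mpr hmem] at hx
        simp at hx
    have hsome : ((List.findIdx? (fun grp => grp.contains x) groups).map
          (fun n : Nat => ((0 : Nat) : Int) + (n : Int))).isSome =
        (List.findIdx? (fun grp => grp.contains x) groups).isSome := by
      cases List.findIdx? (fun grp => grp.contains x) groups <;> rfl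
    constructor
    · intro hx
      have hs := hiff.mpr (by
        cases h' : (pass1 groups 0 PySem.Dict.empty).get? x with
        | none =>
          exfalso
          rw [hget x] at h'
          have : (List.findIdx? (fun grp => grp.contains x) groups).isSome = true := by
            rw [List.findIdx?_isSome]
            rw [List.any_eq_true]
            rw [List.mem_flatten] at hx
            obtain ⟨l, hl, hxl⟩ := hx
            exact ⟨l, hl, by simpa [List.contains_iff_mem] using hxl⟩
          rw [← hsome, h'] at this
          simp at this
        | some k => rfl)
      -- hs : x ∈ keys; but we need the other direction of the iff; restate
      exact hs
    · intro hx
      have hs : ((pass1 groups 0 PySem.Dict.empty).get? x).isSome = true := hiff.mp hx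
      rw [hget x, hsome, List.findIdx?_isSome, List.any_eq_true] at hs
      obtain ⟨grp, hgrp, hc⟩ := hs
      rw [List.mem_flatten]
      exact ⟨grp, hgrp, by simpa [List.contains_iff_mem] using hc⟩
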